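-- pv_equiv track=rewrite | github.com/zdodds/contributed-submissions | submissions_ist341_sp2025/final|Copy_of_CGU_Week2__&_.py | transcribe_one
-- ===== SOURCE A (Python) =====
-- def transcribe_one(s):
--     """ input: a string s
--         output: a new string with transcribed characters
--     """
--     if s == "":
--         return s                      #if the string is empty, return it as is
--     elif s[0] == "a":
--         return "u" + transcribe_one(s[1:])#replace 'a' with 'u' and call function on the remaining
--     elif s[0] == "c":
--         return "g" + transcribe_one(s[1:]) #replace 'c' with 'g' and call function on the remaining
--     elif s[0] == "g":
--         return "c" + transcribe_one(s[1:])  #replace 'g' with 'c' and call function on the remaining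
--     elif s[0] == "t":
--         return "a" + transcribe_one(s[1:]) #replace 't' with 'a' and call function on the remaining
--     else:
--         return "_" + transcribe_one(s[1:])    #replace non-transcribable characters with '_'
-- ===== SOURCE B (Python) =====
-- def transcribe_one(s):
--     """ input: a string s
--         output: a new string with transcribed characters
--     """
--     acc = []
--     for ch in s:
--         if ch == "a":
--             acc.append("u")
--         elif ch == "c":
--             acc.append("g")
--         elif ch == "g":
--             acc.append("c")
--         elif ch == "t":
--             acc.append("a")
--         else:
--             acc.append("_")
--     return "".join(acc)
-- ===== Notes on version B (the rewrite author's own statement) =====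
-- stated objective: idiomatic
-- what changed: Replaced the character-by-character recursion (which rebuilds the tail string at every step and hits the recursion limit on long inputs) with a single iterative loop accumulating mapped characters into a list joined once at the end.
import Mathlib
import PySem

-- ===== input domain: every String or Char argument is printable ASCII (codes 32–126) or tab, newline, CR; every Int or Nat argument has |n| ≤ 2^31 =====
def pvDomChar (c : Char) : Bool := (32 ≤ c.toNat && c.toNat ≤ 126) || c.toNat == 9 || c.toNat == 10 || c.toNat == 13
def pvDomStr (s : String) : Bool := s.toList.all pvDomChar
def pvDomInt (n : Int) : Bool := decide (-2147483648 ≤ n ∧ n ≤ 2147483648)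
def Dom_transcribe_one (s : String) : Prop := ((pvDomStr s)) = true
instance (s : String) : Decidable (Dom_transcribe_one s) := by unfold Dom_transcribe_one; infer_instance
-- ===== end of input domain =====

-- B replaces A's tail-rebuilding recursion with one iterative accumulate-and-join pass (idiomatic, avoids quadratic slicing).


-- ===== PORT A =====
-- A's recursion, branch for branch, over the character list (s == "" test, s[0] dispatch, recurse on s[1:])
def transcribe_one_recA : List Char → List Char
  | [] => []
  | c :: rest =>
    if c = 'a' then 'u' :: transcribe_one_recA rest
    else if c = 'c' then 'g' :: transcribe_one_recA rest
    else if c = 'g' then 'c' :: transcribe_one_recA rest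
    else if c = 't' then 'a' :: transcribe_one_recA rest
    else '_' :: transcribe_one_recA rest

def transcribe_one (s : String) : String := String.ofList (transcribe_one_recA s.toList)

-- ===== PORT B =====
-- B's per-character mapping used inside the loop body
def transcribe_one_map (c : Char) : Char :=
  if c = 'a' then 'u'
  else if c = 'c' then 'g'
  else if c = 'g' then 'c'
  else if c = 't' then 'a'
  else '_'

-- B's loop: fold over the characters, appending the mapped character to the accumulator, join at the end
def transcribe_one_alt (s : String) : String :=
  String.ofList (s.toList.foldl (fun acc c => acc ++ [transcribe_one_map c]) [])

-- ===== PRECONDITION & SPEC =====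
def Spec_transcribe_one (s : String) (out : String) : Prop := out = transcribe_one_alt s
instance (s : String) (out : String) : Decidable (Spec_transcribe_one s out) := by unfold Spec_transcribe_one; infer_instance

-- ===== CLAIM (what is proved, stated in full; the proofs are below) =====
def Claim_equal_transcribe_one : Prop := ∀ (s : String), Dom_transcribe_one s → Spec_transcribe_one s (transcribe_one s)

-- ===== LEMMAS AND PROOFS =====

-- loop invariant: B's fold extends the accumulator by exactly A's recursive result
theorem transcribe_one_fold_eq (l : List Char) (acc : List Char) :
    l.foldl (fun acc c => acc ++ [transcribe_one_map c]) acc = acc ++ transcribe_one_recA l := by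
  induction l generalizing acc with
  | nil => simp [transcribe_one_recA]
  | cons c rest ih =>
    simp only [List.foldl]
    rw [ih]
    unfold transcribe_one_recA transcribe_one_map
    split_ifs <;> simp <;> exact (transcribe_one_recA.eq_def rest).symm

-- ===== VERDICT (by name: the statement is the Claim_ definition above) =====
theorem transcribe_one_spec : Claim_equal_transcribe_one := by
  intro s _
  unfold Spec_transcribe_one transcribe_one transcribe_one_alt
  rw [transcribe_one_fold_eq]
  simp
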